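-- pv_equiv track=rewrite | github.com/vivshaw/zettel | .scripts/frontmatter-converter.py | needs_conversion
-- ===== SOURCE A (Python) =====
-- def needs_conversion(content):
--     """Check if the file needs conversion by looking for :: syntax before any bullet points."""
--     lines = content.split('\n')
--     for line in lines:
--         if line.strip().startswith('-'):
--             return False
--         if '::' in line:
--             return True
--     return False
-- ===== SOURCE B (Python) =====
-- def needs_conversion(content):
--     """Check if the file needs conversion by looking for :: syntax before any bullet points."""
--     lines = content.split('\n')
--     n = len(lines)
--     first_bullet = next((i for i, l in enumerate(lines) if l.strip().startswith('-')), n)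
--     first_marker = next((i for i, l in enumerate(lines) if '::' in l), n)
--     return first_marker < first_bullet
-- ===== Notes on version B (the rewrite author's own statement) =====
-- stated objective: alternative
-- what changed: Replaces the single interleaved early-exit per-line loop by two independent positional lookups (index of the first bullet line and index of the first marker line, with the line count as sentinel) and a strict comparison between them.
import Mathlib
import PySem

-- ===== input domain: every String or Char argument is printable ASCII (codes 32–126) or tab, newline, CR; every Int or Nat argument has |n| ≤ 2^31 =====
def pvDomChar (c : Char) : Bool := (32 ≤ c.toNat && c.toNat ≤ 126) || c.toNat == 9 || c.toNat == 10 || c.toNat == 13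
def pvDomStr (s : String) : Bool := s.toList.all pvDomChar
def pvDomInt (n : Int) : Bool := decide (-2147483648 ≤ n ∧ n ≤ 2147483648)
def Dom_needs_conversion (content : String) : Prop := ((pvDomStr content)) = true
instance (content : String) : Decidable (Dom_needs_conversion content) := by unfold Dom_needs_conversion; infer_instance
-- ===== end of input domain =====

-- B replaces A's interleaved early-exit loop by two independent first-index lookups
-- (first bullet line, first '::' line) compared strictly; alternative decomposition, same cost.


-- ===== PORT A =====
-- A's early-exit for-loop over the lines, as structural recursion.
def needsConvLoop : List String → Bool
  | [] => false
  | l :: ls =>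
    if PySem.Str.startswith (PySem.Str.strip l) "-" then false
    else if PySem.Str.isIn "::" l then true
    else needsConvLoop ls

def needs_conversion (content : String) : Bool :=
  needsConvLoop ((PySem.Str.split? content "\n").getD [])

-- ===== PORT B =====
def needs_conversion_alt (content : String) : Bool :=
  let lines := (PySem.Str.split? content "\n").getD []
  let firstBullet := lines.findIdx (fun l => PySem.Str.startswith (PySem.Str.strip l) "-")
  let firstMarker := lines.findIdx (fun l => PySem.Str.isIn "::" l)
  decide (firstMarker < firstBullet)

-- ===== PRECONDITION & SPEC =====
def Spec_needs_conversion (content : String) (out : Bool) : Prop := out = needs_conversion_alt content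
instance (content : String) (out : Bool) : Decidable (Spec_needs_conversion content out) := by unfold Spec_needs_conversion; infer_instance

-- ===== CLAIM (what is proved, stated in full; the proofs are below) =====
def Claim_equal_needs_conversion : Prop := ∀ (content : String), Dom_needs_conversion content → Spec_needs_conversion content (needs_conversion content)

-- ===== LEMMAS AND PROOFS =====
theorem needsConvLoop_eq_findIdx (lines : List String) :
    needsConvLoop lines =
      decide (lines.findIdx (fun l => PySem.Str.isIn "::" l) <
        lines.findIdx (fun l => PySem.Str.startswith (PySem.Str.strip l) "-")) := by
  induction lines with
  | nil => simp [needsConvLoop]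
  | cons l ls ih =>
    rw [needsConvLoop, List.findIdx_cons, List.findIdx_cons]
    by_cases hb : PySem.Str.startswith (PySem.Str.strip l) "-" = true
    · rw [if_pos hb, hb, cond_true]
      simp
    · rw [if_neg hb]
      rw [Bool.not_eq_true] at hb
      rw [hb, cond_false]
      by_cases hm : PySem.Str.isIn "::" l = true
      · rw [if_pos hm, hm, cond_true]
        simp
      · rw [if_neg hm]
        rw [Bool.not_eq_true] at hm
        rw [hm, cond_false, ih]
        simp

-- ===== VERDICT (by name: the statement is the Claim_ definition above) =====
theorem needs_conversion_spec : Claim_equal_needs_conversion := by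
  intro content _
  unfold Spec_needs_conversion needs_conversion needs_conversion_alt
  exact needsConvLoop_eq_findIdx _
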